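-- pv_equiv track=rewrite | github.com/GeileSau187/SWP-RubnS | lotto.py | rankCounts
-- ===== SOURCE A (Python) =====
-- def rankCounts(hand):
--   # returns dict rank -> count using only basics
--   counts = {}
--   for (s, r) in hand:
--     if r in counts:
--       counts[r] += 1
--     else:
--       counts[r] = 1
--   return counts
-- ===== SOURCE B (Python) =====
-- def rankCounts(hand):
--   # distinct ranks in first-appearance order, then one counting scan per rank
--   ranks = [r for (s, r) in hand]
--   distinct = list(dict.fromkeys(ranks))
--   return {r: ranks.count(r) for r in distinct}
-- ===== Notes on version B (the rewrite author's own statement) =====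
-- stated objective: alternative
-- what changed: Replaces the single accumulating dict pass with building the list of distinct ranks first and then counting each distinct rank by a separate list.count scan.
import Mathlib
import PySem

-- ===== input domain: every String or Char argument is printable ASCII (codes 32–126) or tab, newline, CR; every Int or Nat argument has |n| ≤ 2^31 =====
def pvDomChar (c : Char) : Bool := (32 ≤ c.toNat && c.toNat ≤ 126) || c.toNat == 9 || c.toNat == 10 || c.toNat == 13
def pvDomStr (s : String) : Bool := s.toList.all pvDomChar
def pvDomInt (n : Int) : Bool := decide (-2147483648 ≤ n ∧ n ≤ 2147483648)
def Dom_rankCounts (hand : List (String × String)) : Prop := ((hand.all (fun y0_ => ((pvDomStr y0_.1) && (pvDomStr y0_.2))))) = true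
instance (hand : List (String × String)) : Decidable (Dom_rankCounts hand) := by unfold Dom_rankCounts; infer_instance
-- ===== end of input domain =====

-- B replaces A's single accumulating dict pass by distinct-ranks-then-count-each (alternative decomposition, same results).

-- ===== PORT A =====
-- counts = {}; for (s, r) in hand: if r in counts: counts[r] += 1 else counts[r] = 1; return counts
def rankCounts (hand : List (String × String)) : List (String × Int) :=
  (hand.foldl
    (fun (counts : PySem.Dict String Int) p =>
      if counts.contains p.2 then counts.insert p.2 (counts.getD p.2 0 + 1)
      else counts.insert p.2 1)
    PySem.Dict.empty).items

-- ===== PORT B =====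
-- ranks = [r for (s, r) in hand]; distinct = list(dict.fromkeys(ranks)); {r: ranks.count(r) for r in distinct}
def rankCounts_alt (hand : List (String × String)) : List (String × Int) :=
  let ranks := hand.map (fun p => p.2)
  let distinct := PySem.Set.ofList ranks
  distinct.map (fun r => (r, (PySem.List.count ranks r : Int)))

-- ===== PRECONDITION & SPEC =====
def Spec_rankCounts (hand : List (String × String)) (out : List (String × Int)) : Prop := out = rankCounts_alt hand
instance (hand : List (String × String)) (out : List (String × Int)) : Decidable (Spec_rankCounts hand out) := by unfold Spec_rankCounts; infer_instance

-- ===== CLAIM (what is proved, stated in full; the proofs are below) =====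
def Claim_equal_rankCounts : Prop := ∀ (hand : List (String × String)), Dom_rankCounts hand → Spec_rankCounts hand (rankCounts hand)

-- ===== LEMMAS AND PROOFS =====

-- A's two branches are one insert: when r is absent, getD r 0 = 0, so insert r 1 = insert r (getD r 0 + 1)
theorem rankCounts_body_eq (counts : PySem.Dict String Int) (p : String × String) :
    (if counts.contains p.2 then counts.insert p.2 (counts.getD p.2 0 + 1)
     else counts.insert p.2 1)
    = counts.insert p.2 (counts.getD p.2 0 + 1) := by
  by_cases h : counts.contains p.2
  · simp [h]
  · rw [if_neg h, PySem.Dict.getD_of_not_contains (h := by simpa using h), zero_add]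

-- ===== VERDICT (by name: the statement is the Claim_ definition above) =====
theorem rankCounts_spec : Claim_equal_rankCounts := by
  intro hand _
  unfold Spec_rankCounts rankCounts rankCounts_alt
  have h1 : hand.foldl
      (fun (counts : PySem.Dict String Int) p =>
        if counts.contains p.2 then counts.insert p.2 (counts.getD p.2 0 + 1)
        else counts.insert p.2 1)
      PySem.Dict.empty
      = (hand.map (fun p => p.2)).foldl
        (fun (d : PySem.Dict String Int) r => d.insert r (d.getD r 0 + 1))
        PySem.Dict.empty := by
    rw [List.foldl_map]
    exact PySem.List.foldl_congr_mem hand _ _ PySem.Dict.empty (fun d p _ => rankCounts_body_eq d p)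
  rw [h1, PySem.Dict.foldl_insert_getD_add_one_eq_counter, PySem.Dict.items_counter]
  simp [PySem.List.count_eq]
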